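-- pv_equiv track=rewrite | github.com/TongWu/JAVDB_AutoSpider | packages/python/javdb_platform/db.py | _moviehistory_actor_columns_physical_order_ok
-- ===== SOURCE A (Python) =====
-- from typing import Any, Dict, Iterable, List, Optional, Tuple
--
-- def _moviehistory_actor_columns_all_present(names: List[str]) -> bool:
--     req = frozenset(
--         ("ActorName", "ActorGender", "ActorLink", "SupportingActors"),
--     )
--     return req.issubset(set(names))
--
-- def _moviehistory_actor_columns_physical_order_ok(names: List[str]) -> bool:
--     """True iff the four actor columns appear in storage order: Name < Gender < Link < Supporting."""
--     if not _moviehistory_actor_columns_all_present(names):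
--         return False
--     idx = {k: names.index(k) for k in ("ActorName", "ActorGender", "ActorLink", "SupportingActors")}
--     return (
--         idx["ActorName"]
--         < idx["ActorGender"]
--         < idx["ActorLink"]
--         < idx["SupportingActors"]
--     )
-- ===== SOURCE B (Python) =====
-- from typing import List
--
-- _REQ_ORDER = ["ActorName", "ActorGender", "ActorLink", "SupportingActors"]
--
-- def _moviehistory_actor_columns_physical_order_ok(names: List[str]) -> bool:
--     """One pass: collect the required columns in first-occurrence order, compare to the target order."""
--     order: List[str] = []
--     for n in names:
--         if n in _REQ_ORDER and n not in order:
--             order.append(n)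
--     return order == _REQ_ORDER
-- ===== Notes on version B (the rewrite author's own statement) =====
-- stated objective: simpler
-- what changed: Replaces the set-subset presence check plus four list.index scans and chained index comparisons with a single pass that collects the required columns in first-occurrence order and compares that list to the target order.
import Mathlib
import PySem

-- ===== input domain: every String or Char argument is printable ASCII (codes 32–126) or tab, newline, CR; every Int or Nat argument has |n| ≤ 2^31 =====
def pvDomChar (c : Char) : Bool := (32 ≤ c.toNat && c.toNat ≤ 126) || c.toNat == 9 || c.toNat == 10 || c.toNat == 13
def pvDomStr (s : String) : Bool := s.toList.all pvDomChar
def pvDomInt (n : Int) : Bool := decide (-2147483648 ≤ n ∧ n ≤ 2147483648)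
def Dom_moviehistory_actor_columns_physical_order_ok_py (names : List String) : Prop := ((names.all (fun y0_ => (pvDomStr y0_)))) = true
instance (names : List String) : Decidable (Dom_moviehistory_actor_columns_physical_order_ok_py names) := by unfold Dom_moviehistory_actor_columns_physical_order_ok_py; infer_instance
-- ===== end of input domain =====

-- B replaces the subset check plus four list.index scans with one pass collecting the
-- required columns in first-occurrence order and comparing that list to the target order (simpler).

-- the four required columns in their required storage order (shared constant)
def pvReq : List String := ["ActorName", "ActorGender", "ActorLink", "SupportingActors"]

-- ===== PORT A =====
-- req.issubset(set(names)) = every required name occurs in names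
def pvAllPresent (names : List String) : Bool :=
  pvReq.all (fun k => names.contains k)

def moviehistory_actor_columns_physical_order_ok_py (names : List String) : Bool :=
  if pvAllPresent names = false then false
  else
    -- names.index(k): guarded by the presence check, so index? is never none here (getD 0 unreachable)
    let iN := (PySem.List.index? names "ActorName").getD 0
    let iG := (PySem.List.index? names "ActorGender").getD 0
    let iL := (PySem.List.index? names "ActorLink").getD 0
    let iS := (PySem.List.index? names "SupportingActors").getD 0
    decide (iN < iG) && decide (iG < iL) && decide (iL < iS)

-- ===== PORT B =====
def pvStep (acc : List String) (n : String) : List String :=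
  if pvReq.contains n && !(acc.contains n) then acc ++ [n] else acc

def moviehistory_actor_columns_physical_order_ok_py_alt (names : List String) : Bool :=
  (names.foldl pvStep []) == pvReq

-- ===== PRECONDITION & SPEC =====
def Spec_moviehistory_actor_columns_physical_order_ok_py (names : List String) (out : Bool) : Prop := out = moviehistory_actor_columns_physical_order_ok_py_alt names
instance (names : List String) (out : Bool) : Decidable (Spec_moviehistory_actor_columns_physical_order_ok_py names out) := by unfold Spec_moviehistory_actor_columns_physical_order_ok_py; infer_instance

-- ===== CLAIM (what is proved, stated in full; the proofs are below) =====
def Claim_equal_moviehistory_actor_columns_physical_order_ok_py : Prop := ∀ (names : List String), Dom_moviehistory_actor_columns_physical_order_ok_py names → Spec_moviehistory_actor_columns_physical_order_ok_py names (moviehistory_actor_columns_physical_order_ok_py names)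

-- ===== LEMMAS AND PROOFS =====

-- B's loop, written as structural recursion (acc only consulted through membership)
def pvCollect (acc : List String) : List String → List String
  | [] => []
  | x :: xs =>
      if pvReq.contains x && !(acc.contains x) then x :: pvCollect (acc ++ [x]) xs
      else pvCollect acc xs

lemma pvFoldl_collect (xs : List String) : ∀ acc, List.foldl pvStep acc xs = acc ++ pvCollect acc xs := by
  induction xs with
  | nil => intro acc; simp [pvCollect]
  | cons x xs ih =>
      intro acc
      by_cases h : x ∈ pvReq ∧ x ∉ acc
      · simp [pvCollect, pvStep, h, ih]
      · simp [pvCollect, pvStep, h, ih]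

-- strict order on optional first-occurrence indexes (none = absent)
def pvOptLt : Option Nat → Option Nat → Prop
  | some a, some b => a < b
  | _, _ => False

-- "every key of ks occurs in names and their first indexes strictly increase in ks order"
def pvIncr (names : List String) : List String → Prop
  | [] => True
  | [k] => (PySem.List.index? names k).isSome
  | k1 :: k2 :: ks =>
      pvOptLt (PySem.List.index? names k1) (PySem.List.index? names k2) ∧ pvIncr names (k2 :: ks)

lemma pvOptLt_map (a b : Option Nat) : pvOptLt (a.map (· + 1)) (b.map (· + 1)) ↔ pvOptLt a b := by
  cases a <;> cases b <;> simp [pvOptLt]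

lemma pvIncr_head_isSome (names : List String) (k : String) (ks : List String)
    (h : pvIncr names (k :: ks)) : (PySem.List.index? names k).isSome := by
  cases ks with
  | nil => exact h
  | cons k2 ks =>
      rcases h with ⟨h1, _⟩
      cases hk : PySem.List.index? names k with
      | none =>
          rw [hk] at h1
          cases h2 : PySem.List.index? names k2 <;> rw [h2] at h1 <;> exact h1.elim
      | some a => simp

lemma pvIncr_cons_of_not_mem (x : String) (xs : List String) : ∀ ks : List String, x ∉ ks →
    (pvIncr (x :: xs) ks ↔ pvIncr xs ks) := by
  intro ks
  induction ks with
  | nil => intro _; simp [pvIncr]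
  | cons k1 ks ih =>
      intro hx
      have hk1 : x ≠ k1 := fun h => hx (h ▸ List.mem_cons_self ..)
      have hxk : x ∉ ks := fun h => hx (List.mem_cons_of_mem _ h)
      cases ks with
      | nil =>
          simp [pvIncr, PySem.List.index?_cons_of_ne xs hk1, -PySem.List.index?_eq_idxOf?]
      | cons k2 ks' =>
          have hk2 : x ≠ k2 := fun h => hxk (h ▸ List.mem_cons_self ..)
          show pvOptLt _ _ ∧ pvIncr (x :: xs) (k2 :: ks') ↔ pvOptLt _ _ ∧ pvIncr xs (k2 :: ks')
          rw [PySem.List.index?_cons_of_ne xs hk1, PySem.List.index?_cons_of_ne xs hk2, pvOptLt_map]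
          exact and_congr_right fun _ => ih hxk

lemma pvIncr_cons_self (x : String) (xs ks : List String) (hx : x ∉ ks) :
    pvIncr (x :: xs) (x :: ks) ↔ pvIncr xs ks := by
  cases ks with
  | nil => simp [pvIncr, PySem.List.index?_cons_self, -PySem.List.index?_eq_idxOf?]
  | cons k2 ks' =>
      have hk2 : x ≠ k2 := fun h => hx (h ▸ List.mem_cons_self ..)
      have htail : pvIncr (x :: xs) (k2 :: ks') ↔ pvIncr xs (k2 :: ks') :=
        pvIncr_cons_of_not_mem x xs _ hx
      constructor
      · rintro ⟨_, h2⟩; exact htail.mp h2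
      · intro h
        refine ⟨?_, htail.mpr h⟩
        have hs := pvIncr_head_isSome xs k2 ks' h
        rw [PySem.List.index?_cons_self, PySem.List.index?_cons_of_ne xs hk2]
        cases hk : PySem.List.index? xs k2 with
        | none => rw [hk] at hs; simp at hs
        | some b => show pvOptLt (some 0) (some (b + 1)); simp [pvOptLt]

lemma pvIncr_mem_lt (names : List String) (k m : String) (ks : List String)
    (h : pvIncr names (k :: ks)) (hm : m ∈ ks) :
    ∃ a b, PySem.List.index? names k = some a ∧ PySem.List.index? names m = some b ∧ a < b := by
  induction ks generalizing k with
  | nil => cases hm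
  | cons k2 ks' ih =>
      rcases h with ⟨h1, h2⟩
      cases hk : PySem.List.index? names k with
      | none =>
          rw [hk] at h1
          cases h2' : PySem.List.index? names k2 <;> rw [h2'] at h1 <;> exact h1.elim
      | some a =>
        cases hk2 : PySem.List.index? names k2 with
        | none => rw [hk, hk2] at h1; exact h1.elim
        | some b =>
          have hab : a < b := by rw [hk, hk2] at h1; exact h1
          rcases List.mem_cons.mp hm with rfl | hm'
          · exact ⟨a, b, rfl, hk2, hab⟩
          · rcases ih k2 h2 hm' with ⟨b', c, hb', hc, hbc⟩
            rw [hk2] at hb'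
            exact ⟨a, c, rfl, hc, lt_trans hab (Option.some.inj hb' ▸ hbc)⟩

lemma pvIncr_not_of_mem_tail (x : String) (xs : List String) (k : String) (ks : List String)
    (hx : x ∈ ks) : ¬ pvIncr (x :: xs) (k :: ks) := by
  intro h
  rcases pvIncr_mem_lt (x :: xs) k x ks h hx with ⟨a, b, _, hb, hab⟩
  rw [PySem.List.index?_cons_self] at hb
  have hb0 : (0 : Nat) = b := Option.some.inj hb
  omega

lemma pvReq_nodup : pvReq.Nodup := by decide

lemma pvMain (names : List String) : ∀ (acc pre rest : List String),
    pre ++ rest = pvReq → (∀ s, s ∈ acc ↔ s ∈ pre) →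
    (pvCollect acc names = rest ↔ pvIncr names rest) := by
  induction names with
  | nil =>
      intro acc pre rest _ _
      cases rest with
      | nil => simp [pvCollect, pvIncr]
      | cons k ks =>
          simp only [pvCollect]
          constructor
          · intro h; cases h
          · intro h
            have hs := pvIncr_head_isSome [] k ks h
            rw [PySem.List.index?_isSome_iff] at hs
            exact absurd hs (List.not_mem_nil)
  | cons x xs ih =>
      intro acc pre rest hreq hacc
      have hnd : (pre ++ rest).Nodup := hreq ▸ pvReq_nodup
      by_cases hc : (pvReq.contains x && !(acc.contains x)) = true
      · have hc' := hc
        simp only [Bool.and_eq_true, Bool.not_eq_eq_eq_not, Bool.not_true] at hc'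
        have hxreq : x ∈ pvReq := List.contains_iff_mem.mp hc'.1
        have hxnacc : x ∉ acc := by
          intro hm
          have := List.contains_iff_mem.mpr hm
          rw [hc'.2] at this
          cases this
        have hxpre : x ∉ pre := fun hmem => hxnacc ((hacc x).mpr hmem)
        have hxrest : x ∈ rest := by
          rcases List.mem_append.mp (hreq ▸ hxreq) with h | h
          · exact absurd h hxpre
          · exact h
        cases rest with
        | nil => cases hxrest
        | cons r rs =>
          simp only [pvCollect, if_pos hc]
          by_cases hxr : x = r
          · subst hxr
            have hxrs : x ∉ rs := by
              have := (List.nodup_append.mp hnd).2.1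
              exact (List.nodup_cons.mp this).1
            rw [pvIncr_cons_self x xs rs hxrs]
            have hpre' : (pre ++ [x]) ++ rs = pvReq := by simpa using hreq
            have hacc' : ∀ s, s ∈ acc ++ [x] ↔ s ∈ pre ++ [x] := by
              intro s; simp [hacc s]
            rw [← ih (acc ++ [x]) (pre ++ [x]) rs hpre' hacc']
            constructor
            · intro h; exact (List.cons_eq_cons.mp h).2
            · intro h; rw [h]
          · have hxrs : x ∈ rs := by
              rcases List.mem_cons.mp hxrest with h | h
              · exact absurd h hxr
              · exact h
            constructor
            · intro h; exact absurd (List.cons_eq_cons.mp h).1 hxr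
            · intro h; exact absurd h (pvIncr_not_of_mem_tail x xs r rs hxrs)
      · have hxrest : x ∉ rest := by
          intro hmem
          have hxreq : x ∈ pvReq := hreq ▸ List.mem_append_right _ hmem
          have hxnacc : x ∉ acc := by
            intro hm
            exact (List.disjoint_of_nodup_append hnd) ((hacc x).mp hm) hmem
          apply hc
          rw [Bool.and_eq_true]
          constructor
          · exact List.contains_iff_mem.mpr hxreq
          · have hca : acc.contains x = false := by
              cases hca' : acc.contains x
              · rfl
              · exact absurd (List.contains_iff_mem.mp hca') hxnacc
            rw [hca]; rfl
        simp only [pvCollect, if_neg hc]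
        rw [pvIncr_cons_of_not_mem x xs rest hxrest]
        exact ih acc pre rest hreq hacc

lemma pvA_iff (names : List String) :
    moviehistory_actor_columns_physical_order_ok_py names = true ↔ pvIncr names pvReq := by
  cases hiN : PySem.List.index? names "ActorName" <;>
    cases hiG : PySem.List.index? names "ActorGender" <;>
      cases hiL : PySem.List.index? names "ActorLink" <;>
        cases hiS : PySem.List.index? names "SupportingActors" <;>
          simp [moviehistory_actor_columns_physical_order_ok_py, pvAllPresent, pvReq, pvIncr,
            pvOptLt, hiN, hiG, hiL, hiS, and_assoc, ← PySem.List.index?_isSome_iff,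
            -PySem.List.index?_eq_idxOf?, -List.isSome_idxOf?]

-- ===== VERDICT (by name: the statement is the Claim_ definition above) =====
theorem moviehistory_actor_columns_physical_order_ok_py_spec : Claim_equal_moviehistory_actor_columns_physical_order_ok_py := by
  intro names _
  unfold Spec_moviehistory_actor_columns_physical_order_ok_py
  unfold moviehistory_actor_columns_physical_order_ok_py_alt
  rw [pvFoldl_collect, List.nil_append]
  rw [Bool.eq_iff_iff]
  rw [beq_iff_eq]
  rw [pvA_iff]
  exact (pvMain names [] [] pvReq rfl (by simp)).symm
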